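-- pv_equiv track=rewrite | github.com/BrutalArmy04/Cursuri_Laboratoare_Seminare | Algoritmi Fundamentali/Lab 3/Lab3.py | clustering_kruskal
-- ===== SOURCE A (Python) =====
-- class UnionFind:
--     def __init__(self, n):
--         self.parent = list(range(n))
--         self.rank = [0] * n
--
--     def find(self, x):
--         if self.parent[x] != x:
--             self.parent[x] = self.find(self.parent[x])
--         return self.parent[x]
--
--     def union(self, x, y):
--         root_x = self.find(x)
--         root_y = self.find(y)
--
--         if root_x == root_y:
--             return False
--
--         if self.rank[root_x] < self.rank[root_y]:
--             self.parent[root_x] = root_y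
--         elif self.rank[root_x] > self.rank[root_y]:
--             self.parent[root_y] = root_x
--         else:
--             self.parent[root_y] = root_x
--             self.rank[root_x] += 1
--         return True
--
-- def levenshtein_distance(s1, s2):
--     if len(s1) < len(s2):
--         return levenshtein_distance(s2, s1)
--
--     if len(s2) == 0:
--         return len(s1)
--
--     previous_row = list(range(len(s2) + 1))
--     for i, c1 in enumerate(s1):
--         current_row = [i + 1]
--         for j, c2 in enumerate(s2):
--             insertions = previous_row[j + 1] + 1
--             deletions = current_row[j] + 1
--             substitutions = previous_row[j] + (c1 != c2)
--             current_row.append(min(insertions, deletions, substitutions))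
--         previous_row = current_row
--
--     return previous_row[-1]
--
-- def clustering_kruskal(words, k):
--     n = len(words)
--     if k >= n:
--         return [[word] for word in words], 0
--
--     # Construim toate muchiile
--     edges = []
--     for i in range(n):
--         for j in range(i + 1, n):
--             dist = levenshtein_distance(words[i], words[j])
--             edges.append((i, j, dist))
--
--     # Sortam muchiile dupa distanta
--     edges.sort(key=lambda x: x[2])
--
--     # Algoritmul Kruskal modificat pentru clustering
--     uf = UnionFind(n)
--     mst_edges = []
--
--     for u, v, dist in edges:
--         if uf.find(u) != uf.find(v):
--             if n - len(mst_edges) == k:  # Am ajuns la k componente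
--                 separation_degree = dist
--                 break
--             uf.union(u, v)
--             mst_edges.append((u, v, dist))
--     else:
--         separation_degree = edges[-1][2] if edges else 0
--
--     # Grupam cuvintele dupa componentele conexe
--     clusters = {}
--     for i in range(n):
--         root = uf.find(i)
--         if root not in clusters:
--             clusters[root] = []
--         clusters[root].append(words[i])
--
--     return list(clusters.values()), separation_degree
-- ===== SOURCE B (Python) =====
-- def levenshtein_distance(s1, s2):
--     if len(s1) < len(s2):
--         return levenshtein_distance(s2, s1)
--
--     if len(s2) == 0:
--         return len(s1)
--
--     previous_row = list(range(len(s2) + 1))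
--     for i, c1 in enumerate(s1):
--         current_row = [i + 1]
--         for j, c2 in enumerate(s2):
--             insertions = previous_row[j + 1] + 1
--             deletions = current_row[j] + 1
--             substitutions = previous_row[j] + (c1 != c2)
--             current_row.append(min(insertions, deletions, substitutions))
--         previous_row = current_row
--
--     return previous_row[-1]
--
-- def clustering_kruskal(words, k):
--     # B: full-MST-then-cut Kruskal over a flat label array (no union-find):
--     # run Kruskal to completion recording every accepted edge, keep the first
--     # n-k accepted edges, read the separation degree off the (n-k+1)-th one,
--     # and re-derive the clusters by replaying only the kept edges.
--     n = len(words)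
--     if k >= n:
--         return [[word] for word in words], 0
--
--     edges = [(i, j, levenshtein_distance(words[i], words[j]))
--              for i in range(n) for j in range(i + 1, n)]
--     edges.sort(key=lambda e: e[2])
--
--     labels = list(range(n))
--     accepted = []
--     for u, v, d in edges:
--         a, b = labels[u], labels[v]
--         if a != b:
--             labels = [a if x == b else x for x in labels]
--             accepted.append((u, v, d))
--
--     cut = n - k
--     if cut < len(accepted):
--         separation_degree = accepted[cut][2]
--     else:
--         separation_degree = edges[-1][2] if edges else 0
--
--     lab = list(range(n))
--     for u, v, _ in accepted[:cut]:
--         a, b = lab[u], lab[v]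
--         if a != b:
--             lab = [a if x == b else x for x in lab]
--
--     clusters = {}
--     for i in range(n):
--         clusters.setdefault(lab[i], []).append(words[i])
--     return list(clusters.values()), separation_degree
-- ===== Notes on version B (the rewrite author's own statement) =====
-- stated objective: alternative
-- what changed: A runs a rank+path-compression union-find Kruskal that breaks out early at k components and then groups by union-find roots; B runs Kruskal to completion over a flat label array (no union-find), records the full list of accepted MST edges, reads the separation degree off the (n-k+1)-th accepted edge (falling back to the heaviest pairwise distance), and re-derives the clusters by replaying only the first n-k accepted edges.
import Mathlib
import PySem

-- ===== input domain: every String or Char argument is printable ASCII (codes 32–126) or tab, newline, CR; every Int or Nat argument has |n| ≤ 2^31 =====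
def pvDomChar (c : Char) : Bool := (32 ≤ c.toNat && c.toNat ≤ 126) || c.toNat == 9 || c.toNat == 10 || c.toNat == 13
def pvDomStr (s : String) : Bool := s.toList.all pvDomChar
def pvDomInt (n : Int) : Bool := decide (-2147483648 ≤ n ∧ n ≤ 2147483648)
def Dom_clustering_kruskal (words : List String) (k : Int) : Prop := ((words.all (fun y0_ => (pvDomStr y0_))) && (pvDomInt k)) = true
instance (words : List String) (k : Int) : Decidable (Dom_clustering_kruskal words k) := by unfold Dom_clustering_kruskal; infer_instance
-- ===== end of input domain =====

-- B replaces A's early-stopping union-find Kruskal by full-MST-then-cut over a flat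
-- label array (alternative decomposition, same exact output; not claimed faster).

-- shared helper: levenshtein_distance (textually identical in Source A and Source B)
def pvLev (s1 s2 : List Char) : Int :=
  if s1.length < s2.length then pvLev s2 s1
  else if s2.length = 0 then (s1.length : Int)
  else
    let prev0 : List Int := (List.range (s2.length + 1)).map (fun m => (m : Int))
    let last := (PySem.List.enumerate s1 0).foldl (fun prev ic =>
        (PySem.List.enumerate s2 0).foldl (fun cur jc =>
          let ins := PySem.List.pyGetD prev (jc.1 + 1) 0 + 1
          let del := PySem.List.pyGetD cur jc.1 0 + 1
          let sub := PySem.List.pyGetD prev jc.1 0 + (if ic.2 ≠ jc.2 then 1 else 0)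
          cur ++ [min ins (min del sub)]) [ic.1 + 1]) prev0
    PySem.List.pyGetD last (-1) 0
termination_by (if s1.length < s2.length then 1 else 0)
decreasing_by simp_all [Nat.not_lt.2 (Nat.le_of_lt (by assumption))]

-- ===== PORT A =====
-- UnionFind.find with path compression (fuel n: parent chains in a forest on n nodes)
def pvFind (fuel : Nat) (p : List Nat) (x : Nat) : Nat × List Nat :=
  match fuel with
  | 0 => (x, p)
  | f + 1 =>
    let px := p.getD x 0
    if px ≠ x then
      let rp := pvFind f p px
      (rp.1, rp.2.set x rp.1)
    else (x, p)

-- UnionFind.union (by rank); returned parent, rank lists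
def pvUnion (fuel : Nat) (p rk : List Nat) (x y : Nat) : List Nat × List Nat :=
  let r1 := pvFind fuel p x
  let r2 := pvFind fuel r1.2 y
  if r1.1 = r2.1 then (r2.2, rk)
  else if rk.getD r1.1 0 < rk.getD r2.1 0 then (r2.2.set r1.1 r2.1, rk)
  else if rk.getD r2.1 0 < rk.getD r1.1 0 then (r2.2.set r2.1 r1.1, rk)
  else (r2.2.set r2.1 r1.1, rk.set r1.1 (rk.getD r1.1 0 + 1))

-- Kruskal loop with early break at k components (returns parent, rank, mst, sep?)
def pvLoopA (n : Nat) (k : Int) : List (Nat × Nat × Int) → List Nat → List Nat → List (Nat × Nat × Int) → (List Nat × List Nat × List (Nat × Nat × Int) × Option Int)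
  | [], p, rk, mst => (p, rk, mst, none)
  | (u, v, d) :: rest, p, rk, mst =>
    let f1 := pvFind n p u
    let f2 := pvFind n f1.2 v
    if f1.1 ≠ f2.1 then
      if (n : Int) - mst.length = k then (f2.2, rk, mst, some d)
      else
        let ur := pvUnion n f2.2 rk u v
        pvLoopA n k rest ur.1 ur.2 (mst ++ [(u, v, d)])
    else pvLoopA n k rest f2.2 rk mst

-- clusters: group words by uf.find(i) (threads the parent list as Python mutates it)
def pvGroupA (n : Nat) (words : List String) (p0 : List Nat) : PySem.Dict Nat (List String) :=
  ((List.range n).foldl (fun st i =>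
    let fr := pvFind n st.1 i
    let d := st.2
    let d := if (d.get? fr.1).isNone then d.insert fr.1 [] else d
    (fr.2, d.insert fr.1 (d.getD fr.1 [] ++ [words.getD i ""]))) (p0, PySem.Dict.empty)).2

def clustering_kruskal (words : List String) (k : Int) : List (List String) × Int :=
  let n := words.length
  if k ≥ (n : Int) then (words.map (fun w => [w]), 0)
  else
    let edges0 := (List.range n).foldl (fun es i =>
      (List.range' (i + 1) (n - (i + 1))).foldl (fun es j =>
        es ++ [(i, j, pvLev (words.getD i "").toList (words.getD j "").toList)]) es) []
    let edges := PySem.List.sorted edges0 (fun e => e.2.2) false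
    let res := pvLoopA n k edges (List.range n) (List.replicate n 0) []
    let sep : Int := match res.2.2.2 with
      | some d => d
      | none => if edges ≠ [] then (PySem.List.pyGetD edges (-1) (0, 0, 0)).2.2 else 0
    ((pvGroupA n words res.1).values, sep)

-- ===== PORT B =====
-- merge the label class of b into the class of a (the list comprehension in Source B)
def pvMerge (labels : List Nat) (a b : Nat) : List Nat :=
  labels.map (fun x => if x = b then a else x)

-- full Kruskal over the label array, recording every accepted edge
def pvLoopB : List (Nat × Nat × Int) → List Nat → List (Nat × Nat × Int) → List Nat × List (Nat × Nat × Int)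
  | [], labels, acc => (labels, acc)
  | (u, v, d) :: rest, labels, acc =>
    let a := labels.getD u 0
    let b := labels.getD v 0
    if a ≠ b then pvLoopB rest (pvMerge labels a b) (acc ++ [(u, v, d)])
    else pvLoopB rest labels acc

-- replay of the kept accepted edges on a fresh label array
def pvReplay : List (Nat × Nat × Int) → List Nat → List Nat
  | [], lab => lab
  | (u, v, _) :: rest, lab =>
    let a := lab.getD u 0
    let b := lab.getD v 0
    if a ≠ b then pvReplay rest (pvMerge lab a b) else pvReplay rest lab

-- clusters.setdefault(lab[i], []).append(words[i])
def pvGroupB (n : Nat) (words : List String) (lab : List Nat) : PySem.Dict Nat (List String) :=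
  (List.range n).foldl (fun d i =>
    let key := lab.getD i 0
    let d := d.setdefault key []
    d.insert key (d.getD key [] ++ [words.getD i ""])) PySem.Dict.empty

def clustering_kruskal_alt (words : List String) (k : Int) : List (List String) × Int :=
  let n := words.length
  if k ≥ (n : Int) then (words.map (fun w => [w]), 0)
  else
    let edges := PySem.List.sorted ((List.range n).flatMap (fun i =>
        (List.range' (i + 1) (n - (i + 1))).map (fun j =>
          (i, j, pvLev (words.getD i "").toList (words.getD j "").toList)))) (fun e => e.2.2) false
    let lb := pvLoopB edges (List.range n) []
    let acc := lb.2
    let sep : Int :=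
      if (n : Int) - k < (acc.length : Int) then (PySem.List.pyGetD acc ((n : Int) - k) (0, 0, 0)).2.2
      else if edges ≠ [] then (PySem.List.pyGetD edges (-1) (0, 0, 0)).2.2 else 0
    let kept := PySem.List.slice acc none (some ((n : Int) - k))
    let lab := pvReplay kept (List.range n)
    ((pvGroupB n words lab).values, sep)

-- ===== PRECONDITION & SPEC =====
def Spec_clustering_kruskal (words : List String) (k : Int) (out : List (List String) × Int) : Prop := out = clustering_kruskal_alt words k
instance (words : List String) (k : Int) (out : List (List String) × Int) : Decidable (Spec_clustering_kruskal words k out) := by unfold Spec_clustering_kruskal; infer_instance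

-- ===== CLAIM (what is proved, stated in full; the proofs are below) =====
def Claim_equal_clustering_kruskal : Prop := ∀ (words : List String) (k : Int), Dom_clustering_kruskal words k → Spec_clustering_kruskal words k (clustering_kruskal words k)

-- ===== LEMMAS AND PROOFS =====

-- follow parent pointers with fuel until a fixpoint; none = fuel exhausted
def pvRootD (p : List Nat) : Nat → Nat → Option Nat
  | 0, x => if p.getD x 0 = x then some x else none
  | f + 1, x => if p.getD x 0 = x then some x else pvRootD p f (p.getD x 0)

def pvIter (p : List Nat) : Nat → Nat → Nat
  | 0, x => x
  | i + 1, x => pvIter p i (p.getD x 0)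

def pvValid (n : Nat) (p : List Nat) : Prop :=
  p.length = n ∧ (∀ x, x < n → p.getD x 0 < n) ∧ ∀ x, x < n → (pvRootD p n x).isSome

def pvRoot (n : Nat) (p : List Nat) (x : Nat) : Nat := (pvRootD p n x).getD x

theorem pvRootD_root {p : List Nat} {x : Nat} (h : p.getD x 0 = x) (f : Nat) :
    pvRootD p f x = some x := by cases f <;> · unfold pvRootD; rw [if_pos h]

theorem pvRootD_step {p : List Nat} {x : Nat} (h : p.getD x 0 ≠ x) (f : Nat) :
    pvRootD p (f + 1) x = pvRootD p f (p.getD x 0) := by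
  rw [show pvRootD p (f + 1) x = if p.getD x 0 = x then some x else pvRootD p f (p.getD x 0) from rfl, if_neg h]

theorem pvRootD_mono {p : List Nat} : ∀ {f : Nat} {x r : Nat}, pvRootD p f x = some r →
    ∀ {g : Nat}, f ≤ g → pvRootD p g x = some r := by
  intro f
  induction f with
  | zero => intro x r h g _
            unfold pvRootD at h
            by_cases hx : p.getD x 0 = x
            · rw [if_pos hx] at h; cases h; exact pvRootD_root hx g
            · rw [if_neg hx] at h; cases h
  | succ f ih =>
    intro x r h g hg
    by_cases hx : p.getD x 0 = x
    · rw [pvRootD_root hx] at h; cases h; exact pvRootD_root hx g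
    · rw [pvRootD_step hx] at h
      obtain ⟨g', rfl⟩ : ∃ g', g = g' + 1 := ⟨g - 1, by omega⟩
      rw [pvRootD_step hx]
      exact ih h (by omega)

theorem pvRootD_fix {p : List Nat} : ∀ {f x r : Nat}, pvRootD p f x = some r → p.getD r 0 = r := by
  intro f
  induction f with
  | zero => intro x r h
            unfold pvRootD at h
            by_cases hx : p.getD x 0 = x
            · rw [if_pos hx] at h; cases h; exact hx
            · rw [if_neg hx] at h; cases h
  | succ f ih =>
    intro x r h
    by_cases hx : p.getD x 0 = x
    · rw [pvRootD_root hx] at h; cases h; exact hx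
    · rw [pvRootD_step hx] at h; exact ih h

theorem pvRootD_unique {p : List Nat} {f g x r s : Nat}
    (hf : pvRootD p f x = some r) (hg : pvRootD p g x = some s) : r = s := by
  have h1 := pvRootD_mono hf (Nat.le_max_left f g)
  have h2 := pvRootD_mono hg (Nat.le_max_right f g)
  rw [h1] at h2; exact Option.some.inj h2

theorem pvRoot_spec {n : Nat} {p : List Nat} (hv : pvValid n p) {x : Nat} (hx : x < n) :
    pvRootD p n x = some (pvRoot n p x) := by
  obtain ⟨r, hr⟩ := Option.isSome_iff_exists.1 (hv.2.2 x hx)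
  rw [pvRoot, hr]; rfl

theorem pvRoot_fix {n : Nat} {p : List Nat} (hv : pvValid n p) {x : Nat} (hx : x < n) :
    p.getD (pvRoot n p x) 0 = pvRoot n p x := pvRootD_fix (pvRoot_spec hv hx)

theorem pvRoot_of_root {n : Nat} {p : List Nat} {x : Nat} (h : p.getD x 0 = x) :
    pvRoot n p x = x := by rw [pvRoot, pvRootD_root h]; rfl

-- iter lemmas
theorem pvIter_add {p : List Nat} : ∀ (a b x : Nat), pvIter p (a + b) x = pvIter p b (pvIter p a x) := by
  intro a
  induction a with
  | zero => intro b x; simp [pvIter]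
  | succ a ih => intro b x
                 have h1 : a + 1 + b = (a + b) + 1 := by omega
                 rw [h1]
                 show pvIter p (a + b) (p.getD x 0) = pvIter p b (pvIter p a (p.getD x 0))
                 exact ih b (p.getD x 0)

-- rootD ↔ iter
theorem pvRootD_isSome_of_iter {p : List Nat} :
    ∀ (m x : Nat), p.getD (pvIter p m x) 0 = pvIter p m x → (pvRootD p m x).isSome := by
  intro m
  induction m with
  | zero => intro x h
            unfold pvIter at h
            unfold pvRootD
            rw [if_pos h]; rfl
  | succ m ih =>
    intro x h
    by_cases hx : p.getD x 0 = x
    · rw [pvRootD_root hx]; rfl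
    · rw [pvRootD_step hx]; exact ih (p.getD x 0) h

theorem pvIter_of_rootD {p : List Nat} :
    ∀ {f x r : Nat}, pvRootD p f x = some r → ∃ m ≤ f, pvIter p m x = r := by
  intro f
  induction f with
  | zero => intro x r h
            unfold pvRootD at h
            by_cases hx : p.getD x 0 = x
            · rw [if_pos hx] at h; cases h; exact ⟨0, le_refl _, rfl⟩
            · rw [if_neg hx] at h; cases h
  | succ f ih =>
    intro x r h
    by_cases hx : p.getD x 0 = x
    · rw [pvRootD_root hx] at h; cases h; exact ⟨0, by omega, rfl⟩
    · rw [pvRootD_step hx] at h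
      obtain ⟨m, hm, hit⟩ := ih h
      exact ⟨m + 1, by omega, hit⟩

theorem pvIter_bound {n : Nat} {p : List Nat} (hb : ∀ x, x < n → p.getD x 0 < n) :
    ∀ (m x : Nat), x < n → pvIter p m x < n := by
  intro m
  induction m with
  | zero => intro x hx; exact hx
  | succ m ih => intro x hx; exact ih (p.getD x 0) (hb x hx)

-- the pigeonhole: if the chain from x terminates at all, fuel n suffices
theorem pvRootD_shrink {n : Nat} {p : List Nat}
    (hb : ∀ x, x < n → p.getD x 0 < n) {f x r : Nat} (hx : x < n)
    (h : pvRootD p f x = some r) : pvRootD p n x = some r := by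
  obtain ⟨m, hmf, hit⟩ := pvIter_of_rootD h
  have hfix : p.getD (pvIter p m x) 0 = pvIter p m x := hit ▸ pvRootD_fix h
  -- least m₀ with a fixpoint
  have hex : ∃ m₀, p.getD (pvIter p m₀ x) 0 = pvIter p m₀ x := ⟨m, hfix⟩
  let m₀ := Nat.find hex
  have hfix₀ : p.getD (pvIter p m₀ x) 0 = pvIter p m₀ x := Nat.find_spec hex
  have hmin : ∀ i, i < m₀ → p.getD (pvIter p i x) 0 ≠ pvIter p i x := fun i hi => Nat.find_min hex hi
  -- injectivity of iter on [0, m₀]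
  have hinj : ∀ i j, i < j → j ≤ m₀ → pvIter p i x ≠ pvIter p j x := by
    intro i j hij hjm heq
    have hshift : ∀ t, pvIter p (i + t) x = pvIter p (j + t) x := by
      intro t; rw [pvIter_add, pvIter_add, heq]
    have := hshift (m₀ - j)
    have hj : j + (m₀ - j) = m₀ := by omega
    rw [hj] at this
    have hfixearly : p.getD (pvIter p (i + (m₀ - j)) x) 0 = pvIter p (i + (m₀ - j)) x := by
      rw [this]; exact hfix₀
    exact hmin (i + (m₀ - j)) (by omega) hfixearly
  -- m₀ < n by pigeonhole
  have hm₀ : m₀ < n := by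
    by_contra hge
    rw [Nat.not_lt] at hge
    have hmap : ∀ i : Fin (n + 1), pvIter p i x < n := fun i => pvIter_bound hb i x hx
    have : ∃ i j : Fin (n + 1), i ≠ j ∧ pvIter p i x = pvIter p j x := by
      have hcard : Fintype.card (Fin n) < Fintype.card (Fin (n + 1)) := by simp
      obtain ⟨i, j, hne, heq⟩ := Fintype.exists_ne_map_eq_of_card_lt
        (fun i : Fin (n + 1) => (⟨pvIter p i x, hmap i⟩ : Fin n)) hcard
      exact ⟨i, j, hne, by simpa using heq⟩
    obtain ⟨i, j, hne, heq⟩ := this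
    rcases Nat.lt_or_ge i j with hij | hij
    · exact hinj i j hij (by omega) heq
    · have : (j : Nat) < i := by omega
      exact hinj j i this (by omega) heq.symm
  have h1 : (pvRootD p m₀ x).isSome := pvRootD_isSome_of_iter m₀ x hfix₀
  obtain ⟨s, hs⟩ := Option.isSome_iff_exists.1 h1
  have := pvRootD_mono hs (le_of_lt hm₀)
  rw [this]
  exact congrArg some (pvRootD_unique this h)

theorem pvSet_aux {n : Nat} {p : List Nat} (hv : pvValid n p) {x₀ r₀ : Nat}
    (hx0 : x₀ < n) (hr0 : r₀ < n) (hroot : p.getD r₀ 0 = r₀) (hne : x₀ ≠ r₀)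
    (hcase : p.getD x₀ 0 = x₀ ∨ pvRoot n p x₀ = r₀) :
    ∀ (f y ry : Nat), y < n → pvRootD p f y = some ry →
      pvRootD (p.set x₀ r₀) n y = some (if ry = x₀ then r₀ else ry) := by
  have hlen : p.length = n := hv.1
  have hb : ∀ z, z < n → p.getD z 0 < n := hv.2.1
  have hb' : ∀ z, z < n → (p.set x₀ r₀).getD z 0 < n := by
    intro z hz
    by_cases hzx : z = x₀
    · subst hzx; rw [List.getD_eq_getElem?_getD, List.getElem?_set_self (by omega)]; simpa using hr0
    · rw [List.getD_eq_getElem?_getD, List.getElem?_set_ne (by omega)]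
      have := hb z hz
      rw [List.getD_eq_getElem?_getD] at this
      exact this
  have hget_ne : ∀ z, z ≠ x₀ → (p.set x₀ r₀).getD z 0 = p.getD z 0 := by
    intro z hz
    rw [List.getD_eq_getElem?_getD, List.getElem?_set_ne (by omega), ← List.getD_eq_getElem?_getD]
  have hget_x0 : (p.set x₀ r₀).getD x₀ 0 = r₀ := by
    rw [List.getD_eq_getElem?_getD, List.getElem?_set_self (by omega)]; rfl
  intro f
  induction f with
  | zero =>
    intro y ry hy h
    unfold pvRootD at h
    by_cases hyr : p.getD y 0 = y
    · rw [if_pos hyr] at h; cases h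
      by_cases hyx : y = x₀
      · -- y = x₀ is a root being re-pointed at r₀
        subst hyx
        rw [if_pos rfl]
        have hn1 : ∃ m, n = m + 1 := ⟨n - 1, by omega⟩
        obtain ⟨m, rfl⟩ := hn1
        rw [pvRootD_step (by rw [hget_x0]; exact fun hh => hne hh.symm)]
        rw [hget_x0]
        exact pvRootD_root (by rw [hget_ne r₀ (fun hh => hne hh.symm)]; exact hroot) m
      · rw [if_neg hyx]
        exact pvRootD_root (by rw [hget_ne y hyx]; exact hyr) n
    · rw [if_neg hyr] at h; cases h
  | succ f ih =>
    intro y ry hy h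
    by_cases hyr : p.getD y 0 = y
    · rw [pvRootD_root hyr] at h; cases h
      -- same as the zero case
      by_cases hyx : y = x₀
      · subst hyx
        rw [if_pos rfl]
        obtain ⟨m, rfl⟩ : ∃ m, n = m + 1 := ⟨n - 1, by omega⟩
        rw [pvRootD_step (by rw [hget_x0]; exact fun hh => hne hh.symm)]
        rw [hget_x0]
        exact pvRootD_root (by rw [hget_ne r₀ (fun hh => hne hh.symm)]; exact hroot) m
      · rw [if_neg hyx]
        exact pvRootD_root (by rw [hget_ne y hyx]; exact hyr) n
    · rw [pvRootD_step hyr] at h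
      by_cases hyx : y = x₀
      · -- y = x₀, not a root in p: then pvRoot n p x₀ = r₀ (hcase) and ry = r₀
        subst hyx
        have hry : ry = r₀ := by
          rcases hcase with hc | hc
          · exact absurd hc hyr
          · have h1 := pvRoot_spec hv hx0
            obtain ⟨m, hmeq⟩ : ∃ m, n = m + 1 := ⟨n - 1, by omega⟩
            have h1' : pvRootD p (m + 1) y = some r₀ := by rw [← hmeq, h1, hc]
            rw [pvRootD_step hyr] at h1'
            exact pvRootD_unique h h1'
        rw [hry, if_neg (fun hh => hne hh.symm)]
        obtain ⟨m, rfl⟩ : ∃ m, n = m + 1 := ⟨n - 1, by omega⟩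
        rw [pvRootD_step (by rw [hget_x0]; exact fun hh => hne hh.symm)]
        rw [hget_x0]
        exact pvRootD_root (by rw [hget_ne r₀ (fun hh => hne hh.symm)]; exact hroot) m
      · -- step through y
        have hstep := ih (p.getD y 0) ry (hb y hy) h
        have hres : pvRootD (p.set x₀ r₀) (n + 1) y = some (if ry = x₀ then r₀ else ry) := by
          rw [pvRootD_step (by rw [hget_ne y hyx]; exact hyr)]
          rw [hget_ne y hyx]
          exact hstep
        have := pvRootD_shrink (n := n) hb' hy hres
        exact this

theorem pvSet_preserve {n : Nat} {p : List Nat} (hv : pvValid n p) {x₀ r₀ : Nat}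
    (hx0 : x₀ < n) (hr0 : r₀ < n) (hroot : p.getD r₀ 0 = r₀) (hne : x₀ ≠ r₀)
    (hcase : p.getD x₀ 0 = x₀ ∨ pvRoot n p x₀ = r₀) :
    pvValid n (p.set x₀ r₀) ∧
      ∀ y, y < n → pvRoot n (p.set x₀ r₀) y = (if pvRoot n p y = x₀ then r₀ else pvRoot n p y) := by
  have haux := pvSet_aux hv hx0 hr0 hroot hne hcase
  have hroots : ∀ y, y < n →
      pvRootD (p.set x₀ r₀) n y = some (if pvRoot n p y = x₀ then r₀ else pvRoot n p y) :=
    fun y hy => haux n y (pvRoot n p y) hy (pvRoot_spec hv hy)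
  refine ⟨⟨?_, ?_, ?_⟩, ?_⟩
  · rw [List.length_set]; exact hv.1
  · intro z hz
    by_cases hzx : z = x₀
    · subst hzx; rw [List.getD_eq_getElem?_getD, List.getElem?_set_self (by rw [hv.1]; omega)]
      simpa using hr0
    · rw [List.getD_eq_getElem?_getD, List.getElem?_set_ne (by omega)]
      have := hv.2.1 z hz
      rw [List.getD_eq_getElem?_getD] at this
      exact this
  · intro y hy; rw [hroots y hy]; rfl
  · intro y hy
    rw [pvRoot, hroots y hy]; rfl

-- find with fuel n computes pvRoot and preserves roots
theorem pvFind_spec {n : Nat} (p : List Nat) (hv : pvValid n p) :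
    ∀ (f : Nat) {x r : Nat} (fuel : Nat), x < n → f ≤ fuel → pvRootD p f x = some r →
      (pvFind fuel p x).1 = r ∧ pvValid n (pvFind fuel p x).2 ∧
        ∀ y, y < n → pvRoot n (pvFind fuel p x).2 y = pvRoot n p y := by
  intro f
  induction f with
  | zero =>
    intro x r fuel hx _ h
    unfold pvRootD at h
    by_cases hxr : p.getD x 0 = x
    · rw [if_pos hxr] at h; cases h
      cases fuel with
      | zero => exact ⟨rfl, hv, fun y _ => rfl⟩
      | succ g =>
        have hxr' : p[x]?.getD 0 = x := by rw [← List.getD_eq_getElem?_getD]; exact hxr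
        have hr : pvFind (g + 1) p x = (x, p) := by simp [pvFind, hxr']
        rw [hr]
        exact ⟨rfl, hv, fun y _ => rfl⟩
    · rw [if_neg hxr] at h; cases h
  | succ f ih =>
    intro x r fuel hx hfu h
    by_cases hxr : p.getD x 0 = x
    · rw [pvRootD_root hxr] at h; cases h
      cases fuel with
      | zero => exact ⟨rfl, hv, fun y _ => rfl⟩
      | succ g =>
        have hxr' : p[x]?.getD 0 = x := by rw [← List.getD_eq_getElem?_getD]; exact hxr
        have hr : pvFind (g + 1) p x = (x, p) := by simp [pvFind, hxr']
        rw [hr]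
        exact ⟨rfl, hv, fun y _ => rfl⟩
    · rw [pvRootD_step hxr] at h
      obtain ⟨g, rfl⟩ : ∃ g, fuel = g + 1 := ⟨fuel - 1, by omega⟩
      have hpx : p.getD x 0 < n := hv.2.1 x hx
      obtain ⟨h1, h2, h3⟩ := ih g hpx (by omega) h
      -- pvFind (g+1) p x = (rp.1, rp.2.set x rp.1) with rp = pvFind g p (p.getD x 0)
      have hred : pvFind (g + 1) p x =
          ((pvFind g p (p.getD x 0)).1, (pvFind g p (p.getD x 0)).2.set x (pvFind g p (p.getD x 0)).1) := by
        simp only [pvFind, hxr, ne_eq, not_false_eq_true, if_true]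
      rw [hred]
      have hxnr : x ≠ r := by
        intro hh
        have hfix := pvRootD_fix h
        rw [← hh] at hfix
        exact hxr hfix
      constructor
      · exact h1
      · -- set x r on the compressed parent list
        set p' := (pvFind g p (p.getD x 0)).2 with hp'
        have hrootp : pvRoot n p x = r := by
          have hs := pvRoot_spec hv hx
          obtain ⟨m, hmeq⟩ : ∃ m, n = m + 1 := ⟨n - 1, by omega⟩
          have hs' : pvRootD p (m + 1) x = some (pvRoot n p x) := by rw [← hmeq]; exact hs
          rw [pvRootD_step hxr] at hs'
          exact pvRootD_unique hs' h
        have hrootp' : pvRoot n p' x = r := by rw [h3 x hx]; exact hrootp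
        have hrn : r < n := by
          have := pvIter_of_rootD h
          obtain ⟨m, _, hit⟩ := this
          rw [← hit]; exact pvIter_bound hv.2.1 m _ hpx
        have hfixp' : p'.getD r 0 = r := by
          have h5 := pvRoot_spec h2 hrn
          have h6 : pvRoot n p' r = r := by
            rw [h3 r hrn]
            exact pvRoot_of_root (pvRootD_fix h)
          rw [h6] at h5
          exact pvRootD_fix h5
        rw [h1]
        obtain ⟨hv', hrt'⟩ := pvSet_preserve h2 hx hrn hfixp' hxnr (Or.inr hrootp')
        refine ⟨hv', ?_⟩
        intro y hy
        rw [hrt' y hy, h3 y hy]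
        have hnotx : pvRoot n p y ≠ x := by
          intro hh
          have : p.getD x 0 = x := by
            have := pvRoot_fix hv hy
            rw [hh] at this; exact this
          exact hxr this
        rw [if_neg hnotx]

theorem pvRoot_lt {n : Nat} {p : List Nat} (hv : pvValid n p) {x : Nat} (hx : x < n) :
    pvRoot n p x < n := by
  obtain ⟨m, _, hit⟩ := pvIter_of_rootD (pvRoot_spec hv hx)
  rw [← hit]; exact pvIter_bound hv.2.1 m x hx

theorem pvFindN {n : Nat} {p : List Nat} (hv : pvValid n p) {x : Nat} (hx : x < n) :
    (pvFind n p x).1 = pvRoot n p x ∧ pvValid n (pvFind n p x).2 ∧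
      ∀ y, y < n → pvRoot n (pvFind n p x).2 y = pvRoot n p y :=
  pvFind_spec p hv n n hx (le_refl n) (pvRoot_spec hv hx)

theorem pvMergeRoot_iff {A B rz rw rx ry : Nat} (hrxry : rx ≠ ry)
    (hor : (A = rx ∧ B = ry) ∨ (A = ry ∧ B = rx)) :
    ((if rz = A then B else rz) = (if rw = A then B else rw)) ↔
      (rz = rw ∨ (rz = rx ∧ rw = ry) ∨ (rz = ry ∧ rw = rx)) := by
  rcases hor with ⟨rfl, rfl⟩ | ⟨rfl, rfl⟩ <;> split_ifs <;> omega

theorem pvUnion_spec {n : Nat} {p rk : List Nat} {x y : Nat} (hv : pvValid n p)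
    (hx : x < n) (hy : y < n) (hne : pvRoot n p x ≠ pvRoot n p y) :
    pvValid n (pvUnion n p rk x y).1 ∧
      ∀ z w, z < n → w < n →
        (pvRoot n (pvUnion n p rk x y).1 z = pvRoot n (pvUnion n p rk x y).1 w ↔
          (pvRoot n p z = pvRoot n p w ∨
            (pvRoot n p z = pvRoot n p x ∧ pvRoot n p w = pvRoot n p y) ∨
            (pvRoot n p z = pvRoot n p y ∧ pvRoot n p w = pvRoot n p x))) := by
  obtain ⟨h1a, h1b, h1c⟩ := pvFindN hv hx
  set p1 := (pvFind n p x).2 with hp1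
  obtain ⟨h2a, h2b, h2c⟩ := pvFindN h1b hy
  set p2 := (pvFind n p1 y).2 with hp2
  set rx := pvRoot n p x with hrx
  set ry := pvRoot n p y with hry
  have h2a' : (pvFind n p1 y).1 = ry := by rw [h2a, h1c y hy]
  have hroots2 : ∀ z, z < n → pvRoot n p2 z = pvRoot n p z := by
    intro z hz; rw [h2c z hz, h1c z hz]
  have hrxn : rx < n := pvRoot_lt hv hx
  have hryn : ry < n := pvRoot_lt hv hy
  have hfix2 : ∀ A, A < n → pvRoot n p A = A → p2.getD A 0 = A := by
    intro A hA hAr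
    have := pvRoot_spec h2b hA
    rw [hroots2 A hA, hAr] at this
    exact pvRootD_fix this
  have hrxfix : pvRoot n p rx = rx := pvRoot_of_root (pvRoot_fix hv hx)
  have hryfix : pvRoot n p ry = ry := pvRoot_of_root (pvRoot_fix hv hy)
  have hsetcase : ∀ A B, A < n → B < n → A ≠ B → pvRoot n p A = A → pvRoot n p B = B →
      pvValid n (p2.set A B) ∧ ∀ z, z < n →
        pvRoot n (p2.set A B) z = (if pvRoot n p z = A then B else pvRoot n p z) := by
    intro A B hA hB hABne hAr hBr
    have hAfix2 : p2.getD A 0 = A := hfix2 A hA hAr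
    have hBfix2 : p2.getD B 0 = B := hfix2 B hB hBr
    obtain ⟨hv3, hrt3⟩ := pvSet_preserve h2b hA hB hBfix2 hABne (Or.inl hAfix2)
    refine ⟨hv3, fun z hz => ?_⟩
    rw [hrt3 z hz, hroots2 z hz]
  -- the three rank branches
  show pvValid n (pvUnion n p rk x y).1 ∧ _
  have hu : pvUnion n p rk x y =
      (if ((pvFind n p x).1 : Nat) = (pvFind n p1 y).1 then (p2, rk)
       else if rk.getD (pvFind n p x).1 0 < rk.getD (pvFind n p1 y).1 0 then (p2.set (pvFind n p x).1 (pvFind n p1 y).1, rk)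
       else if rk.getD (pvFind n p1 y).1 0 < rk.getD (pvFind n p x).1 0 then (p2.set (pvFind n p1 y).1 (pvFind n p x).1, rk)
       else (p2.set (pvFind n p1 y).1 (pvFind n p x).1, rk.set (pvFind n p x).1 (rk.getD (pvFind n p x).1 0 + 1))) := rfl
  rw [hu, h1a, h2a']
  rw [if_neg hne]
  by_cases hc1 : rk.getD rx 0 < rk.getD ry 0
  · rw [if_pos hc1]
    obtain ⟨hv3, hrt3⟩ := hsetcase rx ry hrxn hryn hne hrxfix hryfix
    refine ⟨hv3, fun z w hz hw => ?_⟩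
    rw [hrt3 z hz, hrt3 w hw]
    exact pvMergeRoot_iff hne (Or.inl ⟨rfl, rfl⟩)
  · rw [if_neg hc1]
    have hbranch : pvValid n (p2.set ry rx) ∧ ∀ z w, z < n → w < n →
        (pvRoot n (p2.set ry rx) z = pvRoot n (p2.set ry rx) w ↔
          (pvRoot n p z = pvRoot n p w ∨
            (pvRoot n p z = rx ∧ pvRoot n p w = ry) ∨
            (pvRoot n p z = ry ∧ pvRoot n p w = rx))) := by
      obtain ⟨hv3, hrt3⟩ := hsetcase ry rx hryn hrxn (fun hh => hne hh.symm) hryfix hrxfix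
      refine ⟨hv3, fun z w hz hw => ?_⟩
      rw [hrt3 z hz, hrt3 w hw]
      exact pvMergeRoot_iff hne (Or.inr ⟨rfl, rfl⟩)
    by_cases hc2 : rk.getD ry 0 < rk.getD rx 0
    · rw [if_pos hc2]; exact hbranch
    · rw [if_neg hc2]; exact hbranch





def pvRel (n : Nat) (p labels : List Nat) : Prop :=
  ∀ x y, x < n → y < n → (pvRoot n p x = pvRoot n p y ↔ labels.getD x 0 = labels.getD y 0)

theorem pvMerge_length (labels : List Nat) (a b : Nat) :
    (pvMerge labels a b).length = labels.length := by simp [pvMerge]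

theorem pvMerge_getD {labels : List Nat} {x : Nat} (a b : Nat) (hx : x < labels.length) :
    (pvMerge labels a b).getD x 0 = if labels.getD x 0 = b then a else labels.getD x 0 := by
  rw [List.getD_eq_getElem?_getD, List.getD_eq_getElem?_getD]
  simp [pvMerge, List.getElem?_eq_getElem hx]

theorem pvRel_step {n : Nat} {p rk labels : List Nat} {u v : Nat}
    (hv : pvValid n p) (hlen : labels.length = n) (hrel : pvRel n p labels)
    (hu : u < n) (hvn : v < n) (hne : labels.getD u 0 ≠ labels.getD v 0) :
    pvValid n (pvUnion n p rk u v).1 ∧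
      pvRel n (pvUnion n p rk u v).1 (pvMerge labels (labels.getD u 0) (labels.getD v 0)) := by
  have hrne : pvRoot n p u ≠ pvRoot n p v := fun hh => hne ((hrel u v hu hvn).1 hh)
  obtain ⟨hv', hiff⟩ := pvUnion_spec (rk := rk) hv hu hvn hrne
  refine ⟨hv', fun x y hx hy => ?_⟩
  rw [hiff x y hx hy]
  rw [pvMerge_getD _ _ (by omega), pvMerge_getD _ _ (by omega)]
  rw [pvMergeRoot_iff hne (Or.inr ⟨rfl, rfl⟩)]
  rw [hrel x y hx hy, hrel x u hx hu, hrel y v hy hvn, hrel x v hx hvn, hrel y u hy hu]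

theorem pvLoopB_acc : ∀ (es : List (Nat × Nat × Int)) (labels : List Nat) (acc : List (Nat × Nat × Int)),
    pvLoopB es labels acc = ((pvLoopB es labels []).1, acc ++ (pvLoopB es labels []).2) := by
  intro es
  induction es with
  | nil => intro labels acc; simp [pvLoopB]
  | cons e rest ih =>
    intro labels acc
    obtain ⟨u, v, d⟩ := e
    show pvLoopB ((u, v, d) :: rest) labels acc = _
    by_cases hab : labels.getD u 0 ≠ labels.getD v 0
    · have h1 : pvLoopB ((u, v, d) :: rest) labels acc =
          pvLoopB rest (pvMerge labels (labels.getD u 0) (labels.getD v 0)) (acc ++ [(u, v, d)]) := by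
        simp only [pvLoopB, if_pos hab]
      have h2 : pvLoopB ((u, v, d) :: rest) labels [] =
          pvLoopB rest (pvMerge labels (labels.getD u 0) (labels.getD v 0)) ([] ++ [(u, v, d)]) := by
        simp only [pvLoopB, if_pos hab]
      rw [h1, h2, ih _ (acc ++ [(u, v, d)]), ih _ ([] ++ [(u, v, d)])]
      simp
    · have h1 : pvLoopB ((u, v, d) :: rest) labels acc = pvLoopB rest labels acc := by
        simp only [pvLoopB, if_neg hab]
      have h2 : pvLoopB ((u, v, d) :: rest) labels [] = pvLoopB rest labels [] := by
        simp only [pvLoopB, if_neg hab]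
      rw [h1, h2, ih _ acc]

theorem pvSim (n : Nat) (k : Int) :
    ∀ (es : List (Nat × Nat × Int)) (p rk : List Nat) (mst : List (Nat × Nat × Int)) (labels : List Nat),
      pvValid n p → labels.length = n → pvRel n p labels →
      (∀ e ∈ es, e.1 < n ∧ e.2.1 < n) →
      (((0 ≤ (n : Int) - k - mst.length ∧ (n : Int) - k - mst.length < ((pvLoopB es labels []).2.length : Int)) →
          (pvLoopA n k es p rk mst).2.2.2 =
            some (((pvLoopB es labels []).2.getD ((n : Int) - k - mst.length).toNat (0, 0, 0)).2.2) ∧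
          pvValid n (pvLoopA n k es p rk mst).1 ∧
          pvRel n (pvLoopA n k es p rk mst).1
            (pvReplay ((pvLoopB es labels []).2.take ((n : Int) - k - mst.length).toNat) labels)) ∧
        (¬(0 ≤ (n : Int) - k - mst.length ∧ (n : Int) - k - mst.length < ((pvLoopB es labels []).2.length : Int)) →
          (pvLoopA n k es p rk mst).2.2.2 = none ∧
          pvValid n (pvLoopA n k es p rk mst).1 ∧
          pvRel n (pvLoopA n k es p rk mst).1 (pvLoopB es labels []).1 ∧
          (pvLoopB es labels []).1 = pvReplay (pvLoopB es labels []).2 labels ∧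
          (pvLoopA n k es p rk mst).2.2.1.length = mst.length + (pvLoopB es labels []).2.length)) := by
  intro es
  induction es with
  | nil =>
    intro p rk mst labels hv hlen hrel _
    constructor
    · intro h
      exfalso
      have : (pvLoopB ([] : List (Nat × Nat × Int)) labels []).2.length = 0 := by simp [pvLoopB]
      rw [this] at h
      omega
    · intro _
      refine ⟨rfl, hv, ?_, rfl, by simp [pvLoopB, pvLoopA]⟩
      show pvRel n p labels
      exact hrel
  | cons e rest ih =>
    intro p rk mst labels hv hlen hrel hwf
    obtain ⟨u, v, d⟩ := e
    have hu : u < n := (hwf _ (List.mem_cons_self)).1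
    have hvn : v < n := (hwf _ (List.mem_cons_self)).2
    have hwf' : ∀ e ∈ rest, e.1 < n ∧ e.2.1 < n := fun e he => hwf e (List.mem_cons_of_mem _ he)
    obtain ⟨hf1a, hf1b, hf1c⟩ := pvFindN hv hu
    obtain ⟨hf2a, hf2b, hf2c⟩ := pvFindN hf1b hvn
    set p1 := (pvFind n p u).2
    set p2 := (pvFind n p1 v).2
    have hroots2 : ∀ z, z < n → pvRoot n p2 z = pvRoot n p z := by
      intro z hz; rw [hf2c z hz, hf1c z hz]
    have hf2a' : (pvFind n p1 v).1 = pvRoot n p v := by rw [hf2a, hf1c v hvn]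
    have hrel2 : pvRel n p2 labels := by
      intro x y hx hy; rw [hroots2 x hx, hroots2 y hy]; exact hrel x y hx hy
    have hcondAB : ((pvFind n p u).1 ≠ (pvFind n p1 v).1) ↔ (labels.getD u 0 ≠ labels.getD v 0) := by
      rw [hf1a, hf2a']
      exact not_congr (hrel u v hu hvn)
    have hA : pvLoopA n k ((u, v, d) :: rest) p rk mst =
        (if (pvFind n p u).1 ≠ (pvFind n p1 v).1 then
          (if (n : Int) - mst.length = k then (p2, rk, mst, some d)
           else pvLoopA n k rest (pvUnion n p2 rk u v).1 (pvUnion n p2 rk u v).2 (mst ++ [(u, v, d)]))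
         else pvLoopA n k rest p2 rk mst) := rfl
    by_cases hab : labels.getD u 0 ≠ labels.getD v 0
    · -- accepted candidate
      have hB : pvLoopB ((u, v, d) :: rest) labels [] =
          ((pvLoopB rest (pvMerge labels (labels.getD u 0) (labels.getD v 0)) []).1,
            (u, v, d) :: (pvLoopB rest (pvMerge labels (labels.getD u 0) (labels.getD v 0)) []).2) := by
        have h1 : pvLoopB ((u, v, d) :: rest) labels [] =
            pvLoopB rest (pvMerge labels (labels.getD u 0) (labels.getD v 0)) ([] ++ [(u, v, d)]) := by
          simp only [pvLoopB, if_pos hab]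
        rw [h1, pvLoopB_acc]
        simp
      set labels' := pvMerge labels (labels.getD u 0) (labels.getD v 0) with hlabels'
      set Δ' := (pvLoopB rest labels' []).2 with hΔ'
      rw [hA, if_pos (hcondAB.2 hab), hB]
      by_cases hbrk : (n : Int) - mst.length = k
      · rw [if_pos hbrk]
        constructor
        · intro h
          have ht0 : ((n : Int) - k - mst.length).toNat = 0 := by omega
          rw [ht0]
          refine ⟨rfl, hf2b, ?_⟩
          show pvRel n p2 (pvReplay (((u, v, d) :: Δ').take 0) labels)
          rw [List.take_zero]
          exact hrel2
        · intro h
          exfalso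
          apply h
          constructor
          · omega
          · simp only [List.length_cons]
            omega
      · rw [if_neg hbrk]
        obtain ⟨hv3, hrel3⟩ := pvRel_step hf2b hlen hrel2 hu hvn hab
        have hlen' : labels'.length = n := by rw [hlabels', pvMerge_length]; exact hlen
        obtain ⟨C1, C2⟩ := ih (pvUnion n p2 rk u v).1 (pvUnion n p2 rk u v).2 (mst ++ [(u, v, d)]) labels' hv3 hlen' hrel3 hwf'
        have hmstlen : ((mst ++ [(u, v, d)]).length : Int) = (mst.length : Int) + 1 := by simp
        have htne : (n : Int) - k - mst.length ≠ 0 := by omega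
        have hreplay_cons : ∀ (xs : List (Nat × Nat × Int)),
            pvReplay ((u, v, d) :: xs) labels = pvReplay xs labels' := by
          intro xs
          show (if labels.getD u 0 ≠ labels.getD v 0 then pvReplay xs (pvMerge labels (labels.getD u 0) (labels.getD v 0)) else pvReplay xs labels) = _
          rw [if_pos hab]
        constructor
        · intro h
          obtain ⟨h0, h1⟩ := h
          simp only [List.length_cons] at h1
          have h0' : 0 ≤ (n : Int) - k - ((mst ++ [(u, v, d)]).length : Int) := by rw [hmstlen]; omega
          have h1' : (n : Int) - k - ((mst ++ [(u, v, d)]).length : Int) < (Δ'.length : Int) := by rw [hmstlen]; omega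
          obtain ⟨hsep, hval, hrel4⟩ := C1 ⟨h0', h1'⟩
          have htnat : ((n : Int) - k - mst.length).toNat =
              ((n : Int) - k - ((mst ++ [(u, v, d)]).length : Int)).toNat + 1 := by rw [hmstlen]; omega
          refine ⟨?_, hval, ?_⟩
          · rw [hsep, htnat, List.getD_cons_succ]
          · rw [htnat, List.take_succ_cons, hreplay_cons]
            exact hrel4
        · intro h
          have h' : ¬(0 ≤ (n : Int) - k - ((mst ++ [(u, v, d)]).length : Int) ∧
              (n : Int) - k - ((mst ++ [(u, v, d)]).length : Int) < (Δ'.length : Int)) := by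
            rw [hmstlen]
            intro ⟨ha, hb⟩
            apply h
            constructor
            · omega
            · simp only [List.length_cons]; omega
          obtain ⟨hsep, hval, hrelf, hrep, hlenf⟩ := C2 h'
          refine ⟨hsep, hval, hrelf, ?_, ?_⟩
          · rw [hreplay_cons]; exact hrep
          · rw [hlenf, ← hΔ']; simp; omega
    · -- skipped candidate
      rw [Decidable.not_not] at hab
      have hB : pvLoopB ((u, v, d) :: rest) labels [] = pvLoopB rest labels [] := by
        simp only [pvLoopB]
        rw [if_neg (by rw [Decidable.not_not]; exact hab)]
      rw [hA, if_neg (by rw [hcondAB, Decidable.not_not]; exact hab), hB]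
      exact ih p2 rk mst labels hf2b hlen hrel2 hwf'



def pvGroupPure (n : Nat) (words : List String) (f : Nat → Nat) : PySem.Dict Nat (List String) :=
  (List.range n).foldl (fun d i => d.modify (f i) [] (· ++ [words.getD i ""])) PySem.Dict.empty

theorem pvStepA_modify (d : PySem.Dict Nat (List String)) (r : Nat) (w : String) :
    (let d1 := if (d.get? r).isNone then d.insert r [] else d
     d1.insert r (d1.getD r [] ++ [w])) = d.modify r [] (· ++ [w]) := by
  show (if (d.get? r).isNone then d.insert r [] else d).insert r
      ((if (d.get? r).isNone then d.insert r [] else d).getD r [] ++ [w]) = _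
  by_cases h : (d.get? r).isNone
  · rw [if_pos h]
    have hg : (d.insert r ([] : List String)).getD r [] = [] := PySem.Dict.getD_insert_self d r [] []
    rw [hg, PySem.Dict.insert_insert_self]
    show d.insert r ([] ++ [w]) = d.insert r (d.getD r [] ++ [w])
    rw [PySem.Dict.getD_of_get?_eq_none d [] (Option.isNone_iff_eq_none.1 h)]
  · rw [if_neg h]
    rfl

theorem pvStepB_modify (d : PySem.Dict Nat (List String)) (r : Nat) (w : String) :
    (let d1 := d.setdefault r []
     d1.insert r (d1.getD r [] ++ [w])) = d.modify r [] (· ++ [w]) := by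
  show (d.setdefault r []).insert r ((d.setdefault r []).getD r [] ++ [w]) = _
  by_cases h : d.contains r
  · rw [PySem.Dict.setdefault_of_contains d [] h]; rfl
  · rw [PySem.Dict.setdefault_of_not_contains d [] (by simpa using h)]
    have hg : (d.insert r ([] : List String)).getD r [] = [] := PySem.Dict.getD_insert_self d r [] []
    rw [hg, PySem.Dict.insert_insert_self]
    show d.insert r ([] ++ [w]) = d.insert r (d.getD r [] ++ [w])
    rw [PySem.Dict.getD_of_not_contains d [] (by simpa using h)]

theorem pvGroupA_fold {n : Nat} (words : List String) (p0 : List Nat) :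
    ∀ (is : List Nat) (p : List Nat) (d : PySem.Dict Nat (List String)),
      pvValid n p → (∀ i ∈ is, i < n) → (∀ y, y < n → pvRoot n p y = pvRoot n p0 y) →
      (is.foldl (fun st i =>
        let fr := pvFind n st.1 i
        let d := st.2
        let d := if (d.get? fr.1).isNone then d.insert fr.1 [] else d
        (fr.2, d.insert fr.1 (d.getD fr.1 [] ++ [words.getD i ""]))) (p, d)).2 =
      is.foldl (fun d i => d.modify (pvRoot n p0 i) [] (· ++ [words.getD i ""])) d := by
  intro is
  induction is with
  | nil => intro p d _ _ _; rfl
  | cons i rest ih =>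
    intro p d hv his hroots
    have hi : i < n := his i List.mem_cons_self
    obtain ⟨hfa, hfb, hfc⟩ := pvFindN hv hi
    simp only [List.foldl_cons]
    rw [show (let fr := pvFind n p i
        let d' := d
        let d'' := if (d'.get? fr.1).isNone then d'.insert fr.1 [] else d'
        (fr.2, d''.insert fr.1 (d''.getD fr.1 [] ++ [words.getD i ""]))) =
        ((pvFind n p i).2, PySem.Dict.modify d (pvRoot n p0 i) [] (· ++ [words.getD i ""])) from ?_]
    · exact ih (pvFind n p i).2 _ hfb (fun j hj => his j (List.mem_cons_of_mem _ hj))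
        (fun y hy => by rw [hfc y hy]; exact hroots y hy)
    · show ((pvFind n p i).2,
        (if (d.get? (pvFind n p i).1).isNone then d.insert (pvFind n p i).1 [] else d).insert
          (pvFind n p i).1
          ((if (d.get? (pvFind n p i).1).isNone then d.insert (pvFind n p i).1 [] else d).getD
            (pvFind n p i).1 [] ++ [words.getD i ""])) = _
      rw [Prod.mk.injEq]
      refine ⟨rfl, ?_⟩
      rw [pvStepA_modify d (pvFind n p i).1 (words.getD i "")]
      rw [hfa, hroots i hi]

theorem pvGroupA_pure {n : Nat} (words : List String) {p0 : List Nat} (hv : pvValid n p0) :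
    pvGroupA n words p0 = pvGroupPure n words (pvRoot n p0) := by
  unfold pvGroupA pvGroupPure
  exact pvGroupA_fold words p0 (List.range n) p0 PySem.Dict.empty hv
    (fun i hi => List.mem_range.1 hi) (fun _ _ => rfl)

theorem pvGroupB_pure (n : Nat) (words : List String) (lab : List Nat) :
    pvGroupB n words lab = pvGroupPure n words (fun i => lab.getD i 0) := by
  unfold pvGroupB pvGroupPure
  have : ∀ (is : List Nat) (d : PySem.Dict Nat (List String)),
      is.foldl (fun d i =>
        let key := lab.getD i 0
        let d := d.setdefault key []
        d.insert key (d.getD key [] ++ [words.getD i ""])) d =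
      is.foldl (fun d i => d.modify (lab.getD i 0) [] (· ++ [words.getD i ""])) d := by
    intro is
    induction is with
    | nil => intro d; rfl
    | cons i rest ih =>
      intro d
      simp only [List.foldl_cons]
      rw [show (let key := lab.getD i 0
          let d' := d.setdefault key []
          d'.insert key (d'.getD key [] ++ [words.getD i ""])) =
          PySem.Dict.modify d (lab.getD i 0) [] (· ++ [words.getD i ""]) from
        pvStepB_modify d (lab.getD i 0) (words.getD i "")]
      exact ih _
  exact this (List.range n) PySem.Dict.empty

def pvReps (n : Nat) (f : Nat → Nat) : List Nat :=
  (List.range n).filter (fun i => (List.range i).all (fun j => !(f j == f i)))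

theorem pvReps_mem_map (f : Nat → Nat) :
    ∀ (m : Nat) (c : Nat), c ∈ (pvReps m f).map f ↔ c ∈ (List.range m).map f := by
  intro m
  induction m with
  | zero => intro c; simp [pvReps]
  | succ m ih =>
    intro c
    have hrange : List.range (m + 1) = List.range m ++ [m] := List.range_succ
    have hreps : pvReps (m + 1) f = pvReps m f ++
        (if (List.range m).all (fun j => !(f j == f m)) then [m] else []) := by
      unfold pvReps
      rw [hrange, List.filter_append]
      simp [List.filter_singleton]
    by_cases hp : (List.range m).all (fun j => !(f j == f m))
    · rw [hreps, if_pos hp, hrange]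
      simp only [List.map_append, List.mem_append, List.map_cons, List.map_nil, List.mem_cons, List.not_mem_nil, or_false]
      rw [ih c]
    · rw [hreps, if_neg hp, hrange]
      simp only [List.map_append, List.mem_append, List.map_cons, List.map_nil, List.mem_cons, List.not_mem_nil, or_false]
      rw [ih c]
      constructor
      · exact Or.inl
      · rintro (h | h)
        · exact h
        · -- c = f m and some j < m has f j = f m
          subst h
          rw [List.all_eq_true] at hp
          push Not at hp
          obtain ⟨j, hj, hfj⟩ := hp
          simp only [Bool.not_eq_true', beq_eq_false_iff_ne, ne_eq, Decidable.not_not] at hfj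
          exact List.mem_map.2 ⟨j, hj, hfj⟩

theorem pvSet_update_reps (f : Nat → Nat) :
    ∀ (m : Nat), PySem.Set.update PySem.Set.empty ((List.range m).map f) = (pvReps m f).map f := by
  intro m
  induction m with
  | zero => rfl
  | succ m ih =>
    have hrange : List.range (m + 1) = List.range m ++ [m] := List.range_succ
    have hreps : pvReps (m + 1) f = pvReps m f ++
        (if (List.range m).all (fun j => !(f j == f m)) then [m] else []) := by
      unfold pvReps
      rw [hrange, List.filter_append]
      simp [List.filter_singleton]
    rw [hrange, List.map_append, hreps]
    show PySem.Set.update _ _ = _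
    unfold PySem.Set.update
    rw [List.foldl_append]
    have hupd : List.foldl PySem.Set.add PySem.Set.empty ((List.range m).map f) = (pvReps m f).map f := ih
    rw [hupd]
    simp only [List.map_cons, List.map_nil, List.foldl_cons, List.foldl_nil]
    show PySem.Set.add ((pvReps m f).map f) (f m) = _
    unfold PySem.Set.add
    by_cases hp : (List.range m).all (fun j => !(f j == f m))
    · rw [if_pos hp]
      rw [if_neg ?_]
      · simp
      · -- f m not in previous reps image
        intro hcon
        have hmem : f m ∈ (pvReps m f).map f := by
          have := List.contains_iff_mem.mp hcon
          simpa using this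
        rw [pvReps_mem_map f m (f m)] at hmem
        obtain ⟨j, hj, hfj⟩ := List.mem_map.1 hmem
        rw [List.all_eq_true] at hp
        have := hp j hj
        simp only [Bool.not_eq_true', beq_eq_false_iff_ne, ne_eq] at this
        exact this hfj
    · rw [if_neg hp]
      rw [if_pos ?_]
      · simp
      · have hmem : f m ∈ (pvReps m f).map f := by
          rw [pvReps_mem_map f m (f m)]
          rw [List.all_eq_true] at hp
          push Not at hp
          obtain ⟨j, hj, hfj⟩ := hp
          simp only [Bool.not_eq_true', beq_eq_false_iff_ne, ne_eq, Decidable.not_not] at hfj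
          exact List.mem_map.2 ⟨j, hj, hfj⟩
        exact List.contains_iff_mem.mpr (by simpa using hmem)

theorem pvGroupPure_values (n : Nat) (words : List String) (f : Nat → Nat) :
    (pvGroupPure n words f).values =
      (pvReps n f).map (fun r =>
        ((List.range n).filter (fun i => f i == f r)).map (fun i => words.getD i "")) := by
  have hfold : pvGroupPure n words f =
      ((List.range n).map (fun i => (f i, words.getD i ""))).foldl
        (fun d p => d.modify p.1 [] (· ++ [p.2])) PySem.Dict.empty := by
    unfold pvGroupPure
    rw [List.foldl_map]
  have hkeys : (pvGroupPure n words f).keys = PySem.Set.update PySem.Set.empty ((List.range n).map f) := by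
    rw [hfold]
    rw [PySem.Dict.keys_foldl_modify_key ((List.range n).map (fun i => (f i, words.getD i ""))) (fun p : Nat × String => p.1) [] (fun _ p => (· ++ [p.2])) PySem.Dict.empty]
    rw [List.map_map]
    rfl
  have hnodup : (pvGroupPure n words f).keys.Nodup := by
    rw [hfold]
    exact PySem.Dict.nodup_keys_foldl_modify_key ((List.range n).map (fun i => (f i, words.getD i ""))) (fun p : Nat × String => p.1) [] (fun _ p => (· ++ [p.2]))
      PySem.Dict.empty (by simp [PySem.Dict.keys_empty])
  have hgetD : ∀ c, (pvGroupPure n words f).getD c [] =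
      ((List.range n).filter (fun i => f i == c)).map (fun i => words.getD i "") := by
    intro c
    rw [hfold, PySem.Dict.getD_foldl_modify_append]
    rw [List.filter_map]
    rw [List.map_map]
    simp only [PySem.Dict.getD_empty, List.nil_append]
    rfl
  rw [PySem.Dict.values_eq_map_keys _ hnodup [], hkeys, pvSet_update_reps f n, List.map_map]
  apply List.map_congr_left
  intro r _
  exact hgetD (f r)

theorem pvGroupPure_values_congr (n : Nat) (words : List String) (f g : Nat → Nat)
    (H : ∀ i j, i < n → j < n → (f i = f j ↔ g i = g j)) :
    (pvGroupPure n words f).values = (pvGroupPure n words g).values := by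
  rw [pvGroupPure_values, pvGroupPure_values]
  have hreps : pvReps n f = pvReps n g := by
    unfold pvReps
    apply List.filter_congr
    intro i hi
    have hi' : i < n := List.mem_range.1 hi
    rw [Bool.eq_iff_iff, List.all_eq_true, List.all_eq_true]
    constructor
    · intro h j hj
      have hj' : (j : Nat) < n := by have := List.mem_range.1 hj; omega
      have := h j hj
      simp only [Bool.not_eq_true', beq_eq_false_iff_ne, ne_eq] at this ⊢
      rw [← H j i hj' hi']
      exact this
    · intro h j hj
      have hj' : (j : Nat) < n := by have := List.mem_range.1 hj; omega
      have := h j hj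
      simp only [Bool.not_eq_true', beq_eq_false_iff_ne, ne_eq] at this ⊢
      rw [H j i hj' hi']
      exact this
  rw [hreps]
  apply List.map_congr_left
  intro r hr
  have hr' : r < n := List.mem_range.1 (List.mem_of_mem_filter hr)
  congr 1
  apply List.filter_congr
  intro i hi
  have hi' : i < n := List.mem_range.1 hi
  rw [Bool.eq_iff_iff, beq_iff_eq, beq_iff_eq]
  exact H i r hi' hr'





-- A's nested append loop builds the same edge list as B's comprehension
theorem pvEdges_eq (words : List String) (n : Nat) :
    (List.range n).foldl (fun es i =>
      (List.range' (i + 1) (n - (i + 1))).foldl (fun es j =>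
        es ++ [(i, j, pvLev (words.getD i "").toList (words.getD j "").toList)]) es) [] =
    (List.range n).flatMap (fun i =>
      (List.range' (i + 1) (n - (i + 1))).map (fun j =>
        (i, j, pvLev (words.getD i "").toList (words.getD j "").toList))) := by
  have hinner : ∀ (i : Nat) (es : List (Nat × Nat × Int)),
      (List.range' (i + 1) (n - (i + 1))).foldl (fun es j =>
        es ++ [(i, j, pvLev (words.getD i "").toList (words.getD j "").toList)]) es =
      es ++ (List.range' (i + 1) (n - (i + 1))).map (fun j =>
        (i, j, pvLev (words.getD i "").toList (words.getD j "").toList)) := by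
    intro i es
    exact PySem.List.foldl_append_singleton_eq_map _ _ es
  calc (List.range n).foldl (fun es i =>
        (List.range' (i + 1) (n - (i + 1))).foldl (fun es j =>
          es ++ [(i, j, pvLev (words.getD i "").toList (words.getD j "").toList)]) es) []
      = (List.range n).foldl (fun es i =>
          es ++ (List.range' (i + 1) (n - (i + 1))).map (fun j =>
            (i, j, pvLev (words.getD i "").toList (words.getD j "").toList))) [] := by
        apply List.foldl_ext
        intro es i _
        exact hinner i es
    _ = _ := by
        rw [PySem.List.foldl_append_eq_flatMap]
        rfl

theorem pvValid_range (n : Nat) : pvValid n (List.range n) := by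
  have hget : ∀ x, x < n → (List.range n).getD x 0 = x := by
    intro x hx
    rw [List.getD_eq_getElem?_getD, List.getElem?_range hx]; rfl
  refine ⟨List.length_range, fun x hx => by rw [hget x hx]; exact hx, fun x hx => ?_⟩
  rw [pvRootD_root (hget x hx)]; rfl

theorem pvRoot_range {n x : Nat} (hx : x < n) : pvRoot n (List.range n) x = x := by
  have hget : (List.range n).getD x 0 = x := by
    rw [List.getD_eq_getElem?_getD, List.getElem?_range hx]; rfl
  exact pvRoot_of_root hget

theorem pvRel_range (n : Nat) : pvRel n (List.range n) (List.range n) := by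
  intro x y hx hy
  rw [pvRoot_range hx, pvRoot_range hy]
  rw [List.getD_eq_getElem?_getD, List.getElem?_range hx,
      List.getD_eq_getElem?_getD, List.getElem?_range hy]
  rfl

theorem pvMain (words : List String) (k : Int) :
    clustering_kruskal words k = clustering_kruskal_alt words k := by
  by_cases hk : k ≥ (words.length : Int)
  · simp only [clustering_kruskal, clustering_kruskal_alt]
    rw [if_pos hk, if_pos hk]
  · simp only [clustering_kruskal, clustering_kruskal_alt]
    rw [if_neg hk, if_neg hk]
    rw [pvEdges_eq words words.length]
    set n := words.length with hn
    set E := (List.range n).flatMap (fun i =>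
      (List.range' (i + 1) (n - (i + 1))).map (fun j =>
        (i, j, pvLev (words.getD i "").toList (words.getD j "").toList))) with hE
    set edges := PySem.List.sorted E (fun e => e.2.2) false with hedges
    have hwf : ∀ e ∈ edges, e.1 < n ∧ e.2.1 < n := by
      intro e he
      rw [hedges, PySem.List.mem_sorted] at he
      rw [hE] at he
      obtain ⟨i, hi, hmem⟩ := List.mem_flatMap.1 he
      obtain ⟨j, hj, rfl⟩ := List.mem_map.1 hmem
      have hi' : i < n := List.mem_range.1 hi
      have hj' : i + 1 ≤ j ∧ j < i + 1 + (n - (i + 1)) := List.mem_range'_1.1 hj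
      refine ⟨hi', ?_⟩
      show j < n
      omega
    obtain ⟨C1, C2⟩ := pvSim n k edges (List.range n) (List.replicate n 0) [] (List.range n)
      (pvValid_range n) List.length_range (pvRel_range n) hwf
    simp only [List.length_nil, Nat.cast_zero, sub_zero] at C1 C2
    set Δ := (pvLoopB edges (List.range n) []).2 with hΔ
    have hknt : 0 ≤ (n : Int) - k := by omega
    by_cases hcut : (n : Int) - k < (Δ.length : Int)
    · obtain ⟨hsep, hval, hrel⟩ := C1 ⟨hknt, hcut⟩
      rw [hsep]
      have hlt : ((n : Int) - k).toNat < Δ.length := by omega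
      have hgetD : Δ.getD ((n : Int) - k).toNat (0, 0, 0) = Δ[((n : Int) - k).toNat] := by
        rw [List.getD_eq_getElem?_getD, List.getElem?_eq_getElem hlt]; rfl
      have hpy : PySem.List.pyGetD Δ ((n : Int) - k) (0, 0, 0) = Δ[((n : Int) - k).toNat] :=
        PySem.List.pyGetD_eq_getElem Δ (0, 0, 0) hknt hcut
      have hcast : (n : Int) - k = ((((n : Int) - k).toNat : Nat) : Int) := by omega
      have hslice : PySem.List.slice Δ none (some ((n : Int) - k)) =
          Δ.take (((n : Int) - k).toNat) := by
        rw [hcast]; exact PySem.List.slice_to_natCast Δ _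
      rw [if_pos hcut, hslice]
      refine Prod.ext ?_ ?_
      · show (pvGroupA n words _).values = (pvGroupB n words _).values
        rw [pvGroupA_pure words hval, pvGroupB_pure]
        exact pvGroupPure_values_congr n words _ _ hrel
      · show Δ.getD ((n : Int) - k).toNat (0, 0, 0) |>.2.2 = _
        rw [hgetD, hpy]
    · obtain ⟨hsep, hval, hrelf, hrep, _⟩ := C2 (fun hcon => hcut hcon.2)
      rw [hsep]
      have htk : Δ.length ≤ ((n : Int) - k).toNat := by omega
      have hslice : PySem.List.slice Δ none (some ((n : Int) - k)) = Δ := by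
        have hcast : (n : Int) - k = ((((n : Int) - k).toNat : Nat) : Int) := by omega
        rw [hcast, PySem.List.slice_to_natCast, List.take_of_length_le htk]
      rw [if_neg hcut, hslice]
      refine Prod.ext ?_ rfl
      show (pvGroupA n words _).values = (pvGroupB n words (pvReplay Δ (List.range n))).values
      rw [← hrep]
      rw [pvGroupA_pure words hval, pvGroupB_pure]
      exact pvGroupPure_values_congr n words _ _ hrelf


-- ===== VERDICT (by name: the statement is the Claim_ definition above) =====
theorem clustering_kruskal_spec : Claim_equal_clustering_kruskal := by
  intro words k _
  unfold Spec_clustering_kruskal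
  exact pvMain words k
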